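-- pv_equiv track=rewrite | github.com/Jaagss/Assignment-2 | Question 2.py | courseno
-- ===== SOURCE A (Python) =====
-- def courseno(n):
--     ans=True
--     for i in n[0]:
--         if i.isalnum():
--             if i.isdigit():
--                 index=n[0].index(i)
--                 if index==0:
--                     ans=False
--                     return ans
--                 if n[0][index:].isalpha():
--                     ans=False
--                     return ans
--             elif i.isalpha() and i.isupper():
--                 ans=True
--             elif i.islower():
--                 ans=False
--                 return ans
--
--     return ans
-- ===== SOURCE B (Python) =====
-- def courseno(n):
--     s = n[0]
--     if s and s[0].isdigit():
--         return False
--     return not any(c.islower() for c in s)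
-- ===== Notes on version B (the rewrite author's own statement) =====
-- stated objective: simpler
-- what changed: Replaces A's stateful loop with its per-digit index() re-scan, dead slice-isalpha branch and no-op ans=True by a leading-digit guard plus a single any() scan for lowercase characters.
import Mathlib
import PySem

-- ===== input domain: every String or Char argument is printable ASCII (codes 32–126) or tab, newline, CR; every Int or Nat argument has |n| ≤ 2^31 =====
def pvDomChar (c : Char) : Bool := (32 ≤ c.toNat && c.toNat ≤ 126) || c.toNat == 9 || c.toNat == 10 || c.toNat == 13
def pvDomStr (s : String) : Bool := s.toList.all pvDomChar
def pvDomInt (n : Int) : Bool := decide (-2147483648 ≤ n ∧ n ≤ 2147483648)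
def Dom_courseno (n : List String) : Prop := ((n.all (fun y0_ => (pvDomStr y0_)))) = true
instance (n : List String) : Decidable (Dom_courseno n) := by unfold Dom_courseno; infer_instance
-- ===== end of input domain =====

-- B replaces A's stateful loop (with its index/slice re-scans and dead isalpha branch)
-- by a leading-digit guard plus one lowercase scan; equivalence on nonempty lists.

-- ===== PORT A =====
def coursenoLoop (s : List Char) (ans : Bool) : List Char → Bool
  | [] => ans
  | i :: rest =>
    if PySem.Chars.isalnum i then
      if PySem.Chars.isdigit i then
        match PySem.List.index? s i with
        | some index =>
          if index = 0 then false
          else if PySem.Chars.strIsalpha (PySem.List.slice s (some (index : Int)) none) then false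
          else coursenoLoop s ans rest
        | none => coursenoLoop s ans rest  -- unreachable: i is drawn from s, so s.index(i) succeeds
      else if PySem.Chars.isalpha i && PySem.Chars.isupper i then
        coursenoLoop s true rest
      else if PySem.Chars.islower i then false
      else coursenoLoop s ans rest
    else coursenoLoop s ans rest

def courseno (n : List String) : Bool :=
  match n with
  | [] => false  -- Python raises IndexError on n[0]; excluded by Pre_
  | s :: _ => coursenoLoop s.toList true s.toList

-- ===== PORT B =====
def courseno_alt (n : List String) : Bool :=
  match n with
  | [] => false  -- Python raises IndexError on n[0]; excluded by Pre_
  | s :: _ =>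
    let cs := s.toList
    if cs.head?.any PySem.Chars.isdigit then false
    else !(cs.any PySem.Chars.islower)

-- ===== PRECONDITION & SPEC =====
-- Pre_ excludes only the empty list, on which Python's n[0] raises IndexError.
def Pre_courseno (n : List String) : Prop := n ≠ []
instance (n : List String) : Decidable (Pre_courseno n) := by unfold Pre_courseno; infer_instance
def pvWitness_courseno : List String := (["CS101"])

def Spec_courseno (n : List String) (out : Bool) : Prop := out = courseno_alt n
instance (n : List String) (out : Bool) : Decidable (Spec_courseno n out) := by unfold Spec_courseno; infer_instance

-- ===== CLAIM (what is proved, stated in full; the proofs are below) =====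
def Claim_equal_courseno : Prop := ∀ (n : List String), Dom_courseno n → Pre_courseno n → Spec_courseno n (courseno n)

-- ===== LEMMAS AND PROOFS =====

lemma char_class_digit_not_alpha (c : Char) (h : PySem.Chars.isdigit c = true) :
    PySem.Chars.isalpha c = false := by
  simp only [PySem.Chars.isdigit, PySem.Chars.isalpha, PySem.Chars.isupper, PySem.Chars.islower,
    Char.le_def, UInt32.le_iff_toNat_le, Bool.and_eq_true, Bool.or_eq_false_iff,
    UInt32.le_iff_toNat_le, Bool.and_eq_false_iff, decide_eq_true_eq,
    decide_eq_false_iff_not, not_le] at *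
  have h0v : '0'.val.toNat = 48 := rfl
  have h9v : '9'.val.toNat = 57 := rfl
  have hAv : 'A'.val.toNat = 65 := rfl
  have hZv : 'Z'.val.toNat = 90 := rfl
  have hav : 'a'.val.toNat = 97 := rfl
  have hzv : 'z'.val.toNat = 122 := rfl
  omega

lemma char_class_digit_alnum (c : Char) (h : PySem.Chars.isdigit c = true) :
    PySem.Chars.isalnum c = true := by
  simp [PySem.Chars.isalnum, h]

lemma char_class_digit_not_lower (c : Char) (h : PySem.Chars.isdigit c = true) :
    PySem.Chars.islower c = false := by
  have := char_class_digit_not_alpha c h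
  simp only [PySem.Chars.isalpha, Bool.or_eq_false_iff] at this
  exact this.2

lemma char_class_upper_not_lower (c : Char) (h : PySem.Chars.isupper c = true) :
    PySem.Chars.islower c = false := by
  simp only [PySem.Chars.isupper, PySem.Chars.islower, Char.le_def, Bool.and_eq_true,
    UInt32.le_iff_toNat_le, Bool.and_eq_false_iff, decide_eq_true_eq,
    decide_eq_false_iff_not, not_le] at *
  have h0v : '0'.val.toNat = 48 := rfl
  have h9v : '9'.val.toNat = 57 := rfl
  have hAv : 'A'.val.toNat = 65 := rfl
  have hZv : 'Z'.val.toNat = 90 := rfl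
  have hav : 'a'.val.toNat = 97 := rfl
  have hzv : 'z'.val.toNat = 122 := rfl
  omega

lemma char_class_lower_alnum (c : Char) (h : PySem.Chars.islower c = true) :
    PySem.Chars.isalnum c = true := by
  simp [PySem.Chars.isalnum, PySem.Chars.isalpha, h]

-- the loop over any suffix t of s, when s does not start with a digit, just scans for a lowercase char
lemma loop_no_digit_head (first : Char) (s' : List Char)
    (hd : PySem.Chars.isdigit first = false) :
    ∀ t : List Char, (∀ c ∈ t, c ∈ first :: s') →
      coursenoLoop (first :: s') true t = !(t.any PySem.Chars.islower) := by
  intro t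
  induction t with
  | nil => intro _; rfl
  | cons i rest ih =>
    intro hsub
    have hirest : ∀ c ∈ rest, c ∈ first :: s' := fun c hc => hsub c (List.mem_cons_of_mem _ hc)
    by_cases han : PySem.Chars.isalnum i = true
    · by_cases hdig : PySem.Chars.isdigit i = true
      · -- digit branch: index ≠ 0 and the slice is not alphabetic, so the loop continues
        have hi : i ∈ first :: s' := hsub i (List.mem_cons_self)
        have hsome : (PySem.List.index? (first :: s') i).isSome = true :=
          (PySem.List.index?_isSome_iff _ _).mpr hi
        obtain ⟨idx, hidx⟩ := Option.isSome_iff_exists.mp hsome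
        obtain ⟨pre, suf, hs, hlen, -⟩ := (PySem.List.index?_eq_some_iff _ _ _).mp hidx
        have hidx0 : idx ≠ 0 := by
          intro h0
          subst h0
          have : pre = [] := List.length_eq_zero_iff.mp hlen
          subst this
          simp only [List.nil_append, List.cons.injEq] at hs
          rw [← hs.1] at hdig
          exact absurd hdig (by simp [hd])
        have hslice : PySem.List.slice (first :: s') (some (idx : Int)) none = i :: suf := by
          rw [PySem.List.slice_from_natCast, hs, List.drop_left' hlen]
        have hnotalpha : PySem.Chars.strIsalpha (i :: suf) = false := by
          simp [PySem.Chars.strIsalpha, char_class_digit_not_alpha i hdig]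
        simp only [coursenoLoop, han, if_true, hdig, hidx, hslice, hnotalpha, hidx0]
        rw [ih hirest]
        simp [char_class_digit_not_lower i hdig]
      · by_cases hup : (PySem.Chars.isalpha i && PySem.Chars.isupper i) = true
        · have hnl : PySem.Chars.islower i = false :=
            char_class_upper_not_lower i (Bool.and_eq_true .. ▸ hup).2
          simp only [coursenoLoop, han, if_true, hdig, hup]
          rw [ih hirest]
          simp [hnl]
        · by_cases hlow : PySem.Chars.islower i = true
          · simp [coursenoLoop, han, hdig, hup, hlow]
          · simp only [coursenoLoop, han, if_true, hdig, hup, hlow]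
            rw [ih hirest]
            simp [Bool.not_eq_true] at hlow
            simp [hlow]
    · have hnl : PySem.Chars.islower i = false := by
        cases h : PySem.Chars.islower i
        · rfl
        · exact absurd (char_class_lower_alnum i h) han
      simp only [coursenoLoop, han]
      rw [ih hirest]
      simp [hnl]

-- ===== VERDICT (by name: the statement is the Claim_ definition above) =====
theorem courseno_spec : Claim_equal_courseno := by
  intro n _ hpre
  match n with
  | [] => exact absurd rfl hpre
  | s :: t =>
    show courseno (s :: t) = courseno_alt (s :: t)
    rw [show courseno (s :: t) = coursenoLoop s.toList true s.toList from rfl,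
        show courseno_alt (s :: t)
            = (if s.toList.head?.any PySem.Chars.isdigit then false
               else !(s.toList.any PySem.Chars.islower)) from rfl]
    cases hcs : s.toList with
    | nil => simp [coursenoLoop]
    | cons c cs' =>
      by_cases hdig : PySem.Chars.isdigit c = true
      · have h0 : List.idxOf? c (c :: cs') = some 0 := PySem.List.index?_cons_self _ _
        simp [coursenoLoop, char_class_digit_alnum c hdig, hdig, h0]
      · rw [loop_no_digit_head c cs' (by simp [Bool.not_eq_true] at hdig; exact hdig)
          (c :: cs') (fun _ h => h)]
        simp [Bool.not_eq_true] at hdig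
        simp [hdig]
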